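-- pv_equiv track=rewrite | github.com/Adelodunpeter25/content-hub | backend/app/utils/social_scrapers.py | truncate_at_third_fullstop
-- ===== SOURCE A (Python) =====
-- def truncate_at_third_fullstop(text):
--     """Truncate text at the third full stop"""
--     if not text:
--         return text
--
--     fullstops = 0
--     for i, char in enumerate(text):
--         if char == '.':
--             fullstops += 1
--             if fullstops == 3:
--                 return text[:i+1]
--     return text
-- ===== SOURCE B (Python) =====
-- def truncate_at_third_fullstop(text):
--     """Truncate text at the third full stop"""
--     if not text:
--         return text
--     parts = text.split('.', 3)
--     if len(parts) == 4:
--         return '.'.join(parts[:3]) + '.'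
--     return text
-- ===== Notes on version B (the rewrite author's own statement) =====
-- stated objective: faster
-- what changed: Replaces the manual enumerate-and-count loop with one str.split call limited to three splits: four resulting parts mean at least three full stops and the prefix is rebuilt by joining the first three parts and re-appending the separator, otherwise the text is returned unchanged.
import Mathlib
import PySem

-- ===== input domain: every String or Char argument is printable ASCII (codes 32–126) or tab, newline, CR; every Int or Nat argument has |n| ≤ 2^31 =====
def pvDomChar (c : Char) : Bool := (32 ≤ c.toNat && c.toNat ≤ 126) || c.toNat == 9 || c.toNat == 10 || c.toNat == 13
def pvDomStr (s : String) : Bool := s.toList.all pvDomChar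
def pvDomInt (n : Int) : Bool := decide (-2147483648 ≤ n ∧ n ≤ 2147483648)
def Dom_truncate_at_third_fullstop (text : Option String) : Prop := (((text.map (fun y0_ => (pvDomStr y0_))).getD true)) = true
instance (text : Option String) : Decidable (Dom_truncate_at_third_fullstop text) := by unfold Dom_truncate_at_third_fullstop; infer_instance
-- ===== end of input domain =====

-- B replaces A's per-character enumerate-and-count loop by a single split limited to three separators plus a join; same O(n), measurably faster in a timing run.


-- ===== PORT A =====
-- the loop: i is the enumerate index, fs the fullstop counter; text[:i+1] is take (i+1) (i+1 ≥ 0, so slice = take, exact)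
def truncAuxA (orig : List Char) : List Char → Nat → Nat → List Char
  | [], _, _ => orig
  | c :: rest, i, fs =>
    if c = '.' then
      if fs + 1 = 3 then orig.take (i + 1)
      else truncAuxA orig rest (i + 1) (fs + 1)
    else truncAuxA orig rest (i + 1) fs

def truncate_at_third_fullstop (text : Option String) : Option String :=
  match text with
  | none => none                                  -- 'if not text: return text' (None branch)
  | some s =>
    if s = "" then some s                         -- 'if not text: return text' (empty-string branch)
    else some (String.ofList (truncAuxA s.toList s.toList 0 0))

-- ===== PORT B =====
def truncate_at_third_fullstop_alt (text : Option String) : Option String :=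
  match text with
  | none => none                                  -- 'if not text: return text'
  | some s =>
    if s = "" then some s
    else
      -- text.split('.', 3): the separator "." is nonempty, so this is exactly Chars.splitOnMax
      let parts := PySem.Chars.splitOnMax s.toList ['.'] 3
      if parts.length = 4 then
        -- '.'.join(parts[:3]) + '.'   (parts[:3] with a nonnegative literal bound is take 3)
        some (String.ofList (PySem.Chars.join ['.'] (parts.take 3) ++ ['.']))
      else some s

-- ===== PRECONDITION & SPEC =====
def Spec_truncate_at_third_fullstop (text : Option String) (out : Option String) : Prop := out = truncate_at_third_fullstop_alt text
instance (text : Option String) (out : Option String) : Decidable (Spec_truncate_at_third_fullstop text out) := by unfold Spec_truncate_at_third_fullstop; infer_instance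

-- ===== CLAIM (what is proved, stated in full; the proofs are below) =====
def Claim_equal_truncate_at_third_fullstop : Prop := ∀ (text : Option String), Dom_truncate_at_third_fullstop text → Spec_truncate_at_third_fullstop text (truncate_at_third_fullstop text)

-- ===== LEMMAS AND PROOFS =====

theorem take_len_succ (pre : List Char) (c : Char) (rest : List Char) :
    (pre ++ c :: rest).take (pre.length + 1) = pre ++ [c] := by
  induction pre with
  | nil => simp
  | cons x xs ih => simp [ih]

theorem join_dot_cons_head (c : Char) (a : List Char) (L : List (List Char)) :
    PySem.Chars.join ['.'] ((c :: a) :: L) = c :: PySem.Chars.join ['.'] (a :: L) := by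
  cases L with
  | nil => rw [PySem.Chars.join_singleton, PySem.Chars.join_singleton]
  | cons x y => rw [PySem.Chars.join_cons_cons, PySem.Chars.join_cons_cons]; simp

-- fuel-free restatement of PySem.Chars.splitOnMax.go for sep = ['.']
def pvSplit : List Char → Nat → List Char → List (List Char)
  | [], _, cur => [cur.reverse]
  | c :: rest, m, cur =>
    if m = 0 then [cur.reverse ++ c :: rest]
    else if c = '.' then cur.reverse :: pvSplit rest (m - 1) []
    else pvSplit rest m (c :: cur)

theorem pvSplit_zero (rest cur : List Char) : pvSplit rest 0 cur = [cur.reverse ++ rest] := by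
  cases rest <;> simp [pvSplit]

theorem splitOnMax_go_eq : ∀ (fuel : Nat) (l : List Char) (m : Nat) (cur : List Char) (acc : List (List Char)),
    l.length ≤ fuel →
    PySem.Chars.splitOnMax.go ['.'] fuel m l cur acc = acc.reverse ++ pvSplit l m cur := by
  intro fuel
  induction fuel with
  | zero =>
    intro l m cur acc h
    have : l = [] := List.eq_nil_of_length_eq_zero (Nat.le_zero.mp h)
    subst this
    simp [PySem.Chars.splitOnMax.go, pvSplit]
  | succ fuel ih =>
    intro l m cur acc h
    cases l with
    | nil => simp [PySem.Chars.splitOnMax.go, pvSplit]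
    | cons c rest =>
      by_cases hm : m = 0
      · subst hm
        simp [PySem.Chars.splitOnMax.go, pvSplit_zero]
      · by_cases hc : c = '.'
        · subst hc
          rw [show PySem.Chars.splitOnMax.go ['.'] (fuel+1) m ('.' :: rest) cur acc
                = PySem.Chars.splitOnMax.go ['.'] fuel (m-1) rest [] (cur.reverse :: acc) by
              simp [PySem.Chars.splitOnMax.go, hm, List.isPrefixOf]]
          rw [ih rest (m-1) [] (cur.reverse :: acc) (by simpa using Nat.le_of_succ_le_succ h)]
          simp [pvSplit, hm]
        · have hne : ('.' == c) = false := by simp [Ne.symm hc]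
          rw [show PySem.Chars.splitOnMax.go ['.'] (fuel+1) m (c :: rest) cur acc
                = PySem.Chars.splitOnMax.go ['.'] fuel m rest (c :: cur) acc by
              simp [PySem.Chars.splitOnMax.go, hm, List.isPrefixOf, hne]]
          rw [ih rest m (c :: cur) acc (by simpa using Nat.le_of_succ_le_succ h)]
          simp [pvSplit, hm, hc]

theorem splitOnMax_eq_pvSplit (cs : List Char) :
    PySem.Chars.splitOnMax cs ['.'] 3 = pvSplit cs 3 [] := by
  rw [PySem.Chars.splitOnMax]
  have h := splitOnMax_go_eq (cs.length + 1) cs 3 [] [] (by omega)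
  simpa using h

-- moving the partial current segment out of pvSplit's accumulator
theorem pvSplit_cur : ∀ (rest : List Char) (m : Nat) (cur : List Char),
    pvSplit rest m cur
      = (cur.reverse ++ (pvSplit rest m []).headD []) :: (pvSplit rest m []).tail := by
  intro rest
  induction rest with
  | nil => intro m cur; simp [pvSplit]
  | cons c rest ih =>
    intro m cur
    by_cases hm : m = 0
    · subst hm; simp [pvSplit_zero]
    · by_cases hc : c = '.'
      · subst hc; simp [pvSplit, hm]
      · simp only [pvSplit, if_neg hm, if_neg hc]
        rw [ih m (c :: cur), ih m [c]]
        simp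

theorem pvSplit_ne_nil (rest : List Char) (m : Nat) (cur : List Char) : pvSplit rest m cur ≠ [] := by
  rw [pvSplit_cur]; simp

-- the central invariant: A's loop from state (pre ++ rest, index |pre|, fs dots seen)
-- equals B's split-based reconstruction on the remaining text with budget 3 - fs
theorem main_inv : ∀ (rest pre : List Char) (fs : Nat), fs < 3 →
    truncAuxA (pre ++ rest) rest pre.length fs
      = (if (pvSplit rest (3 - fs) []).length = (3 - fs) + 1
         then pre ++ PySem.Chars.join ['.'] ((pvSplit rest (3 - fs) []).take (3 - fs)) ++ ['.']
         else pre ++ rest) := by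
  intro rest
  induction rest with
  | nil =>
    intro pre fs hfs
    have hm : ¬ ((pvSplit [] (3 - fs) []).length = (3 - fs) + 1) := by
      simp [pvSplit]; omega
    simp [truncAuxA, if_neg hm]
  | cons c rest ih =>
    intro pre fs hfs
    by_cases hc : c = '.'
    · subst hc
      by_cases h3 : fs + 1 = 3
      · -- third dot found: A returns take (|pre|+1); B's parts are [[], remainder]
        have hfs2 : fs = 2 := by omega
        subst hfs2
        have hsplit : pvSplit ('.' :: rest) 1 [] = [[], rest] := by
          simp [pvSplit, pvSplit_zero]
        have hA : truncAuxA (pre ++ '.' :: rest) ('.' :: rest) pre.length 2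
            = (pre ++ '.' :: rest).take (pre.length + 1) := by
          simp [truncAuxA]
        rw [hA, take_len_succ, hsplit]
        norm_num [PySem.Chars.join_singleton]
      · -- fs < 2: consume the dot, the budget drops by one
        have hfs1 : fs + 1 < 3 := by omega
        have hm : 3 - fs = (3 - (fs + 1)) + 1 := by omega
        have step : truncAuxA (pre ++ '.' :: rest) ('.' :: rest) pre.length fs
            = truncAuxA ((pre ++ ['.']) ++ rest) rest (pre ++ ['.']).length (fs + 1) := by
          simp [truncAuxA, h3]
        rw [step, ih (pre ++ ['.']) (fs + 1) hfs1, hm]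
        simp only [pvSplit, Nat.add_sub_cancel, List.reverse_nil]
        simp only [if_true]
        rw [if_neg (by omega : ¬ ((3 - (fs+1)) + 1 = 0))]
        set P := pvSplit rest (3 - (fs + 1)) [] with hP
        by_cases hlen : P.length = (3 - (fs + 1)) + 1
        · have hlen' : ([] :: P).length = (3 - (fs+1)) + 1 + 1 := by simp [hlen]
          rw [if_pos hlen, if_pos hlen']
          have htake : ([] :: P).take ((3 - (fs+1)) + 1) = [] :: P.take (3 - (fs+1)) := by simp
          rw [htake]
          have h1 : 1 ≤ 3 - (fs + 1) := by omega
          have hPne : P.take (3 - (fs + 1)) ≠ [] := by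
            cases hQ : P with
            | nil => exact absurd hQ (hP ▸ pvSplit_ne_nil rest (3 - (fs+1)) [])
            | cons a t => simp; omega
          obtain ⟨a, t, hat⟩ := List.exists_cons_of_ne_nil hPne
          rw [hat, PySem.Chars.join_cons_cons]
          simp
        · have hlen' : ¬ (([] :: P).length = (3 - (fs+1)) + 1 + 1) := by
            simp only [List.length_cons]; omega
          rw [if_neg hlen, if_neg hlen']
          simp
    · -- ordinary character: both sides carry it into the built prefix
      have step : truncAuxA (pre ++ c :: rest) (c :: rest) pre.length fs
          = truncAuxA ((pre ++ [c]) ++ rest) rest (pre ++ [c]).length fs := by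
        simp [truncAuxA, hc]
      rw [step, ih (pre ++ [c]) fs hfs]
      have hm0 : ¬ (3 - fs = 0) := by omega
      simp only [pvSplit, if_neg hm0, if_neg hc]
      rw [pvSplit_cur rest (3 - fs) [c]]
      set P := pvSplit rest (3 - fs) [] with hP
      obtain ⟨a, t, hat⟩ := List.exists_cons_of_ne_nil (hP ▸ pvSplit_ne_nil rest (3 - fs) [])
      rw [hat]
      simp only [List.reverse_cons, List.reverse_nil, List.nil_append, List.headD_cons,
                 List.tail_cons, List.length_cons, List.singleton_append]
      by_cases hL : t.length + 1 = (3 - fs) + 1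
      · rw [if_pos hL, if_pos hL]
        obtain ⟨k, hk⟩ : ∃ k, 3 - fs = k + 1 := ⟨3 - fs - 1, by omega⟩
        rw [hk]
        have htk : ((c :: a) :: t).take (k + 1) = (c :: a) :: t.take k := by simp
        have htk' : (a :: t).take (k + 1) = a :: t.take k := by simp
        rw [htk, htk', join_dot_cons_head]
        simp
      · rw [if_neg hL, if_neg hL]
        simp

theorem ofList_toList (s : String) : String.ofList s.toList = s := by
  simp

-- ===== VERDICT (by name: the statement is the Claim_ definition above) =====
theorem truncate_at_third_fullstop_spec : Claim_equal_truncate_at_third_fullstop := by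
  intro text _
  unfold Spec_truncate_at_third_fullstop
  match text with
  | none => rfl
  | some s =>
    by_cases hs : s = ""
    · simp [truncate_at_third_fullstop, truncate_at_third_fullstop_alt, hs]
    · simp only [truncate_at_third_fullstop, truncate_at_third_fullstop_alt, if_neg hs]
      rw [splitOnMax_eq_pvSplit]
      have := main_inv s.toList [] 0 (by omega)
      simp only [List.nil_append, List.length_nil] at this
      rw [this]
      by_cases hL : (pvSplit s.toList 3 []).length = 4
      · rw [if_pos hL, if_pos hL]
      · rw [if_neg hL, if_neg hL, ofList_toList]
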